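-- pv_equiv track=rewrite | github.com/unicamp-dl/Lissard | src/repeat_copy_logic/english.py | x_hello_world_not_say_world_every_even_time
-- ===== SOURCE A (Python) =====
-- def x_hello_world_not_say_world_every_even_time(times):
--     '''
--     'say hello world five times, but don't say world every even time',
--     '''
--     out = ''
--     count = 0
--     for x in range(0, times):
--         if count == 1:
--             out+='hello '
--             count=0
--         else:
--             out+='hello world '
--             count+=1
--     return out.strip()
-- ===== SOURCE B (Python) =====
-- def x_hello_world_not_say_world_every_even_time(times):
--     '''
--     'say hello world five times, but don't say world every even time',
--     '''
--     if times <= 0: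
--         return ''
--     s = 'hello world hello ' * (times // 2)
--     if times % 2 == 1:
--         s += 'hello world '
--     return s.strip()
-- ===== Notes on version B (the rewrite author's own statement) =====
-- stated objective: faster
-- what changed: Replaces the per-iteration loop with a counter flag by a closed form: the output repeats a fixed pair of blocks, so B multiplies the 'hello world hello ' block by half of times and appends one 'hello world ' when times is odd.
import Mathlib
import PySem

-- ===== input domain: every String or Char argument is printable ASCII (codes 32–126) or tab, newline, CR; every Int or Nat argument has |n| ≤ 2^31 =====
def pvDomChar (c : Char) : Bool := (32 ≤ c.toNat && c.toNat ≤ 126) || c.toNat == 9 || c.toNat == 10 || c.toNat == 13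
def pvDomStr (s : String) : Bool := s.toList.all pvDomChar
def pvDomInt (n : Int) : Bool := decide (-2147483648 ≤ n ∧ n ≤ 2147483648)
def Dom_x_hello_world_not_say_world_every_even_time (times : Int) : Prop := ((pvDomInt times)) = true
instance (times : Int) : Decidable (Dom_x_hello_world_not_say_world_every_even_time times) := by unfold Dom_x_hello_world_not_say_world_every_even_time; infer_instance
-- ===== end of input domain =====

-- B replaces A's flag-toggling loop by a closed form built from the output's repeating pair structure (objective: faster string building).

-- ===== PORT A =====
def x_hello_world_not_say_world_every_even_time (times : Int) : String :=
  PySem.Str.strip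
    (((PySem.List.pyRange 0 times 1).foldl
        (fun (st : String × Int) _ =>
          if st.2 == 1 then (st.1 ++ "hello ", 0)
          else (st.1 ++ "hello world ", st.2 + 1))
        ("", 0)).1)

-- ===== PORT B =====
-- 'hello world hello ' * k  (Python string repetition, k ≥ 0)
def pvRep (s : String) : Nat → String
  | 0 => ""
  | n+1 => s ++ pvRep s n

def x_hello_world_not_say_world_every_even_time_alt (times : Int) : String :=
  if times ≤ 0 then ""
  else
    -- times > 0 here, so .toNat of times//2 is exact
    PySem.Str.strip
      (pvRep "hello world hello " (PySem.Int.floordiv times 2).toNat ++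
        (if PySem.Int.mod times 2 == 1 then "hello world " else ""))

-- ===== PRECONDITION & SPEC =====
def Spec_x_hello_world_not_say_world_every_even_time (times : Int) (out : String) : Prop := out = x_hello_world_not_say_world_every_even_time_alt times
instance (times : Int) (out : String) : Decidable (Spec_x_hello_world_not_say_world_every_even_time times out) := by unfold Spec_x_hello_world_not_say_world_every_even_time; infer_instance

-- ===== CLAIM (what is proved, stated in full; the proofs are below) =====
def Claim_equal_x_hello_world_not_say_world_every_even_time : Prop := ∀ (times : Int), Dom_x_hello_world_not_say_world_every_even_time times → Spec_x_hello_world_not_say_world_every_even_time times (x_hello_world_not_say_world_every_even_time times)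

-- ===== LEMMAS AND PROOFS =====

-- the string produced by A's loop after n iterations starting with count = 0 / count = 1
mutual
def pvBlk0 : Nat → String
  | 0 => ""
  | n+1 => "hello world " ++ pvBlk1 n
def pvBlk1 : Nat → String
  | 0 => ""
  | n+1 => "hello " ++ pvBlk0 n
end

theorem pvLoop (l : List Int) : ∀ out : String,
    (l.foldl
        (fun (st : String × Int) _ =>
          if st.2 == 1 then (st.1 ++ "hello ", 0)
          else (st.1 ++ "hello world ", st.2 + 1))
        (out, 0)).1 = out ++ pvBlk0 l.length ∧
    (l.foldl
        (fun (st : String × Int) _ =>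
          if st.2 == 1 then (st.1 ++ "hello ", 0)
          else (st.1 ++ "hello world ", st.2 + 1))
        (out, 1)).1 = out ++ pvBlk1 l.length := by
  induction l with
  | nil => intro out; simp [pvBlk0, pvBlk1]
  | cons a l ih =>
      intro out
      constructor
      · simpa [pvBlk0, String.append_assoc] using (ih (out ++ "hello world ")).2
      · simpa [pvBlk1, String.append_assoc] using (ih (out ++ "hello ")).1

theorem pvBlk0_closed : ∀ n : Nat,
    pvBlk0 n = pvRep "hello world hello " (n / 2) ++ (if n % 2 == 1 then "hello world " else "") := by
  intro n
  induction n using Nat.twoStepInduction with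
  | zero => simp [pvBlk0, pvRep]
  | one => simp [pvBlk0, pvBlk1, pvRep]
  | more n ih _ =>
      have h2 : (n + 2) / 2 = n / 2 + 1 := by omega
      have h3 : (n + 2) % 2 = n % 2 := by omega
      simp only [pvBlk0, pvBlk1, h2, h3, pvRep, ih]
      rw [← String.append_assoc, ← String.append_assoc]
      congr 1

-- ===== VERDICT (by name: the statement is the Claim_ definition above) =====
theorem x_hello_world_not_say_world_every_even_time_spec : Claim_equal_x_hello_world_not_say_world_every_even_time := by
  intro times _
  unfold Spec_x_hello_world_not_say_world_every_even_time
  unfold x_hello_world_not_say_world_every_even_time x_hello_world_not_say_world_every_even_time_alt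
  by_cases h : times ≤ 0
  · rw [PySem.List.pyRange_one_eq_nil h]
    simp [h]
    decide
  · rw [Int.not_le] at h
    rw [if_neg (by omega)]
    have hlen : (PySem.List.pyRange 0 times 1).length = times.toNat := by
      rw [PySem.List.length_pyRange_one]; omega
    have := (pvLoop (PySem.List.pyRange 0 times 1) "").1
    rw [hlen] at this
    rw [this]
    have hdiv : (PySem.Int.floordiv times 2).toNat = times.toNat / 2 := by
      simp only [PySem.Int.floordiv]; rw [Int.fdiv_eq_ediv]; norm_num; omega
    have hmod : (PySem.Int.mod times 2 == 1) = (times.toNat % 2 == 1) := by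
      simp only [PySem.Int.mod]; rw [Int.fmod_eq_emod]; norm_num
      rcases Int.emod_two_eq_zero_or_one times with h2 | h2
      · simp [h2, show times.toNat % 2 = 0 by omega]
      · simp [h2, show times.toNat % 2 = 1 by omega]
    rw [hdiv, hmod, pvBlk0_closed]
    simp
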